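-- pv_equiv track=rewrite | github.com/aillopos/adventofcode2021 | day03/binary_diagnostic.py | get_most_frequent_digit
-- ===== SOURCE A (Python) =====
-- def get_most_frequent_digit(data, colno, default):
--     if len(data) <= 1 or colno >= len(data[0]):
--         return data
--
--     digit_sum = 0
--     data0 = []
--     data1 = []
--
--     for d in data:
--         digit_sum += int(d[colno])
--         if int(d[colno]) == 1:
--             data1.append(d)
--         else:
--             data0.append(d)
--
--     if (default == 1 and (digit_sum > len(data) - digit_sum or digit_sum == len(data) - digit_sum)) \
--             or (default == 0 and digit_sum < len(data) - digit_sum):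
--         return get_most_frequent_digit(data1, colno + 1, default)
--     else:
--         return get_most_frequent_digit(data0, colno + 1, default)
-- ===== SOURCE B (Python) =====
-- def get_most_frequent_digit(data, colno, default):
--     # Iterative bit-criteria filtering: one while loop and a single filtered
--     # list per column instead of tail recursion building both partitions.
--     while len(data) > 1 and colno < len(data[0]):
--         n = len(data)
--         digit_sum = sum(int(d[colno]) for d in data)
--         keep_ones = (default == 1 and 2 * digit_sum >= n) or \
--                     (default == 0 and 2 * digit_sum < n)
--         data = [d for d in data if (int(d[colno]) == 1) == keep_ones]
--         colno += 1
--     return data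
-- ===== Notes on version B (the rewrite author's own statement) =====
-- stated objective: simpler
-- what changed: The tail recursion that builds both partitions via per-element appends becomes an iterative while loop that computes the digit sum once and keeps a single filtered list per column.
-- outside the precondition, e.g. on get_most_frequent_digit(['1a', '0b'], 0, 1): A returns ['1a'], B returns ['1a']
import Mathlib
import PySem

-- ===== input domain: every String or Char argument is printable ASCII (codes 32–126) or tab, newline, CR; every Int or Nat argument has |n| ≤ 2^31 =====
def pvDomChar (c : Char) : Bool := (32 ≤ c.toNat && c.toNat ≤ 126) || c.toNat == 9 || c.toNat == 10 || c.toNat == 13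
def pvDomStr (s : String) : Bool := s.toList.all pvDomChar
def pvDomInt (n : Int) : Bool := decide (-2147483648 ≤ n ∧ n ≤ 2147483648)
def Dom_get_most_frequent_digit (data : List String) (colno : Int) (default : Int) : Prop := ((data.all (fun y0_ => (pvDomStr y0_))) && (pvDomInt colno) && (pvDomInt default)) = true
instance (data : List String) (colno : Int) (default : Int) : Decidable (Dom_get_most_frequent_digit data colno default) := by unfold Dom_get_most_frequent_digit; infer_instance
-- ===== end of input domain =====

-- B replaces the tail-recursive two-list partitioning by an iterative loop with one
-- filter per column (same tie condition as A, same cost, return value only).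

-- int(d[colno]) : 0 on the (excluded) inputs where Python would raise
def pvDigit (d : String) (colno : Int) : Int :=
  match PySem.Str.pyGet? d colno with
  | some c => (PySem.Int.ofStr? (String.ofList [c])).getD 0
  | none => 0

-- totality fuel for both loops: an upper bound on the number of iterations (+1)
def pvMaxLen (data : List String) : Int :=
  data.foldl (fun m s => max m ((PySem.Str.len s : Int))) 0

def pvFuel (data : List String) (colno : Int) : Nat :=
  (pvMaxLen data - colno).toNat + 1

-- ===== PORT A =====
def gmfdA : Nat → List String → Int → Int → List String
  | 0, data, _, _ => data
  | fuel+1, data, colno, default =>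
    -- if len(data) <= 1 or colno >= len(data[0]): return data
    if data.length ≤ 1 ∨ ((PySem.Str.len (data.headD "")) : Int) ≤ colno then data
    else
      -- for d in data: digit_sum += int(d[colno]); append d to data1 / data0
      let st := data.foldl (fun (acc : Int × List String × List String) d =>
          (acc.1 + pvDigit d colno,
           if pvDigit d colno = 1 then acc.2.1 else acc.2.1 ++ [d],
           if pvDigit d colno = 1 then acc.2.2 ++ [d] else acc.2.2))
        ((0 : Int), ([] : List String), ([] : List String))
      let digit_sum := st.1
      let n : Int := data.length
      if (default = 1 ∧ (digit_sum > n - digit_sum ∨ digit_sum = n - digit_sum))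
         ∨ (default = 0 ∧ digit_sum < n - digit_sum) then
        gmfdA fuel st.2.2 (colno + 1) default
      else
        gmfdA fuel st.2.1 (colno + 1) default

def get_most_frequent_digit (data : List String) (colno : Int) (default : Int) : List String :=
  gmfdA (pvFuel data colno) data colno default

-- ===== PORT B =====
def gmfdB : Nat → List String → Int → Int → List String
  | 0, data, _, _ => data
  | fuel+1, data, colno, default =>
    -- while len(data) > 1 and colno < len(data[0]):
    if 1 < data.length ∧ colno < ((PySem.Str.len (data.headD "")) : Int) then
      let n : Int := data.length
      let digit_sum := (data.map (fun d => pvDigit d colno)).sum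
      let keep_ones := decide ((default = 1 ∧ n ≤ 2 * digit_sum) ∨
                               (default = 0 ∧ 2 * digit_sum < n))
      gmfdB fuel (data.filter (fun d => decide (pvDigit d colno = 1) == keep_ones))
        (colno + 1) default
    else data

def get_most_frequent_digit_alt (data : List String) (colno : Int) (default : Int) : List String :=
  gmfdB (pvFuel data colno) data colno default

-- ===== PRECONDITION & SPEC =====
-- Pre_ admits every immediate base case and otherwise requires colno ≥ -len(data[0]) and all
-- strings equal-length digit strings: otherwise int(d[colno]) raises ValueError or d[colno]
-- raises IndexError; this slightly over-excludes inputs whose recursion shrinks to a base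
-- case before touching a bad character (both programs still agree there).
def Pre_get_most_frequent_digit (data : List String) (colno : Int) (default : Int) : Prop :=
  data.length ≤ 1 ∨ ((PySem.Str.len (data.headD "")) : Int) ≤ colno ∨
  (-((PySem.Str.len (data.headD "")) : Int) ≤ colno ∧
   (data.all (fun s => (PySem.Str.len s == PySem.Str.len (data.headD "")) &&
     s.toList.all (fun c => 48 ≤ c.toNat && c.toNat ≤ 57))) = true)
instance (data : List String) (colno : Int) (default : Int) : Decidable (Pre_get_most_frequent_digit data colno default) := by unfold Pre_get_most_frequent_digit; infer_instance

def pvWitness_get_most_frequent_digit : List String × Int × Int := (["010", "011", "101"], 0, 1)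

def Spec_get_most_frequent_digit (data : List String) (colno : Int) (default : Int) (out : List String) : Prop := out = get_most_frequent_digit_alt data colno default
instance (data : List String) (colno : Int) (default : Int) (out : List String) : Decidable (Spec_get_most_frequent_digit data colno default out) := by unfold Spec_get_most_frequent_digit; infer_instance

-- ===== CLAIM (what is proved, stated in full; the proofs are below) =====
def Claim_equal_get_most_frequent_digit : Prop := ∀ (data : List String) (colno : Int) (default : Int), Dom_get_most_frequent_digit data colno default → Pre_get_most_frequent_digit data colno default → Spec_get_most_frequent_digit data colno default (get_most_frequent_digit data colno default)

-- ===== LEMMAS AND PROOFS =====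

-- A's partitioning loop computes the digit sum and the two filters
theorem gmfdA_foldl (colno : Int) (l : List String) (s : Int) (d0 d1 : List String) :
    l.foldl (fun (acc : Int × List String × List String) d =>
        (acc.1 + pvDigit d colno,
         if pvDigit d colno = 1 then acc.2.1 else acc.2.1 ++ [d],
         if pvDigit d colno = 1 then acc.2.2 ++ [d] else acc.2.2)) (s, d0, d1)
    = (s + (l.map (fun d => pvDigit d colno)).sum,
       d0 ++ l.filter (fun d => !decide (pvDigit d colno = 1)),
       d1 ++ l.filter (fun d => decide (pvDigit d colno = 1))) := by
  induction l generalizing s d0 d1 with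
  | nil => simp
  | cons a t ih =>
    by_cases h : pvDigit a colno = 1 <;>
      simp [h, ih, add_assoc]

-- step-for-step agreement of the two fueled loops (any default)
theorem gmfd_eq (fuel : Nat) : ∀ (data : List String) (colno default : Int),
    gmfdA fuel data colno default = gmfdB fuel data colno default := by
  induction fuel with
  | zero => intro data colno default; rfl
  | succ fuel ih =>
    intro data colno default
    by_cases hb : data.length ≤ 1 ∨ ((PySem.Str.len (data.headD "")) : Int) ≤ colno
    · have hb' : ¬ (1 < data.length ∧ colno < ((PySem.Str.len (data.headD "")) : Int)) := by
        omega
      rw [gmfdA, gmfdB, if_pos hb, if_neg hb']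
    · have hb' : 1 < data.length ∧ colno < ((PySem.Str.len (data.headD "")) : Int) := by
        omega
      rw [gmfdA, gmfdB, if_neg hb, if_pos hb']
      conv_lhs => rw [gmfdA_foldl]
      dsimp only
      simp only [zero_add, List.nil_append]
      set s := (data.map (fun d => pvDigit d colno)).sum with hs
      set n : Int := (data.length : Int) with hn
      by_cases hc : (default = 1 ∧ (s > n - s ∨ s = n - s)) ∨ (default = 0 ∧ s < n - s)
      · rw [if_pos hc]
        have hk : ((default = 1 ∧ n ≤ 2 * s) ∨ (default = 0 ∧ 2 * s < n)) := by omega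
        have hf : (fun d => decide (pvDigit d colno = 1) ==
            decide ((default = 1 ∧ n ≤ 2 * s) ∨ (default = 0 ∧ 2 * s < n)))
            = fun d => decide (pvDigit d colno = 1) := by
          funext d; simp [hk]
        rw [hf]
        exact ih _ _ _
      · rw [if_neg hc]
        have hk : ¬ ((default = 1 ∧ n ≤ 2 * s) ∨ (default = 0 ∧ 2 * s < n)) := by omega
        have hf : (fun d => decide (pvDigit d colno = 1) ==
            decide ((default = 1 ∧ n ≤ 2 * s) ∨ (default = 0 ∧ 2 * s < n)))
            = fun d => !decide (pvDigit d colno = 1) := by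
          funext d; simp [hk]
        rw [hf]
        exact ih _ _ _

-- ===== VERDICT (by name: the statement is the Claim_ definition above) =====
theorem get_most_frequent_digit_spec : Claim_equal_get_most_frequent_digit := by
  intro data colno default _ _
  exact gmfd_eq _ _ _ _
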